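-- pv_equiv track=rewrite | github.com/joelawalsh01/beamer2animate | beamer2animate/renderer.py | remove_nested_braces
-- ===== SOURCE A (Python) =====
-- def remove_nested_braces(content: str, command: str) -> str:
--     """Remove a command with nested braces like \\fbox{...nested...}."""
--     result = []
--     i = 0
--     cmd = '\\' + command
--
--     while i < len(content):
--         if content[i:].startswith(cmd):
--             j = i + len(cmd)
--             while j < len(content) and content[j] in ' \t\n':
--                 j += 1
--
--             if j < len(content) and content[j] == '{':
--                 brace_count = 1
--                 k = j + 1
--                 while k < len(content) and brace_count > 0:
--                     if content[k] == '{':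
--                         brace_count += 1
--                     elif content[k] == '}':
--                         brace_count -= 1
--                     k += 1
--                 i = k
--                 continue
--
--         result.append(content[i])
--         i += 1
--
--     return ''.join(result)
-- ===== SOURCE B (Python) =====
-- def remove_nested_braces(content: str, command: str) -> str:
--     """Remove a command with nested braces like \\fbox{...nested...}."""
--     cmd = '\\' + command
--     out = []
--     pos = 0
--     n = len(content)
--     while True:
--         idx = content.find(cmd, pos)
--         if idx == -1:
--             out.append(content[pos:])
--             break
--         out.append(content[pos:idx])
--         j = idx + len(cmd)
--         while j < n and content[j] in ' \t\n':
--             j += 1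
--         if j < n and content[j] == '{':
--             brace_count = 1
--             k = j + 1
--             while k < n and brace_count > 0:
--                 c = content[k]
--                 if c == '{':
--                     brace_count += 1
--                 elif c == '}':
--                     brace_count -= 1
--                 k += 1
--             pos = k
--         else:
--             out.append(content[idx])
--             pos = idx + 1
--     return ''.join(out)
-- ===== Notes on version B (the rewrite author's own statement) =====
-- stated objective: faster
-- what changed: Replaces A's per-index scan, whose content[i:].startswith(cmd) copies an O(n) slice at every position and appends one character at a time, with a match-jumping loop: str.find locates the next command occurrence and whole slices between matches are appended at once.
import Mathlib
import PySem

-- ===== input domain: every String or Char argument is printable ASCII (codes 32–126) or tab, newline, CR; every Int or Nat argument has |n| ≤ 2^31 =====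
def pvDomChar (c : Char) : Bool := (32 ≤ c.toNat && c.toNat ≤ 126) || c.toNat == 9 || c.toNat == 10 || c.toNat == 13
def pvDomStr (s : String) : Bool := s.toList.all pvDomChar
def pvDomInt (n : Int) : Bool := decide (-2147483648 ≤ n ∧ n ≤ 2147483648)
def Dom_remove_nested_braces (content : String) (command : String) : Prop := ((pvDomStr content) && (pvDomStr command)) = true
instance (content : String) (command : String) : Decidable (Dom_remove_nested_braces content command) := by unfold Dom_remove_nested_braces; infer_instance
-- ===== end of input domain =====

-- B replaces A's per-index startswith scan (append one char at a time) by a match-jumping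
-- loop over a find-and-split primitive; the brace-skipping primitive is shared. Same value.
-- A's whitespace set ' \t\n'
def pvWs (c : Char) : Bool := c == ' ' || c == '\t' || c == '\n'

-- the inner brace-count while loop of both versions: returns the suffix at index k
def pvSkipBraces : Nat → List Char → List Char
  | _, [] => []
  | bc, c :: rest =>
    if bc = 0 then c :: rest
    else pvSkipBraces (if c = '{' then bc + 1 else if c = '}' then bc - 1 else bc) rest

theorem pvSkipBraces_len (bc : Nat) (l : List Char) : (pvSkipBraces bc l).length ≤ l.length := by
  induction l generalizing bc with
  | nil => simp [pvSkipBraces]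
  | cons c rest ih =>
    simp only [pvSkipBraces]
    split
    · simp
    · exact Nat.le_trans (ih _) (Nat.le_succ _)

-- ===== PORT A =====
-- A's outer while loop, recursing on the current suffix content[i:]
def pvLoopA (cmd : List Char) : List Char → List Char
  | [] => []
  | c :: rest =>
    if cmd.isPrefixOf (c :: rest) then
      match h : ((c :: rest).drop cmd.length).dropWhile pvWs with
      | '{' :: u => pvLoopA cmd (pvSkipBraces 1 u)
      | _ => c :: pvLoopA cmd rest
    else c :: pvLoopA cmd rest
termination_by l => l.length
decreasing_by
  · have h1 : ('{' :: u).length ≤ ((c :: rest).drop cmd.length).length := by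
      rw [← h]; exact List.length_dropWhile_le _ _
    have h2 := pvSkipBraces_len 1 u
    simp [List.length_drop] at h1 ⊢
    omega
  · simp
  · simp

def remove_nested_braces (content : String) (command : String) : String :=
  String.ofList (pvLoopA ('\\' :: command.toList) content.toList)

-- ===== PORT B =====
-- Python's content.find(cmd, pos) together with the two slices content[pos:idx] /
-- content[idx:]: split the suffix at the first match (none = find returned -1);
-- the matched suffix is returned as head char + tail (it is nonempty by construction)
def pvFindSplit (cmd : List Char) : List Char → Option (List Char × Char × List Char)
  | [] => none
  | c :: rest =>
    if cmd.isPrefixOf (c :: rest) then some ([], c, rest)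
    else (pvFindSplit cmd rest).map (fun x => (c :: x.1, x.2.1, x.2.2))

theorem pvFindSplit_spec (cmd : List Char) (s pre : List Char) (c : Char) (r : List Char)
    (h : pvFindSplit cmd s = some (pre, c, r)) :
    s = pre ++ c :: r ∧ cmd.isPrefixOf (c :: r) := by
  induction s generalizing pre with
  | nil => simp [pvFindSplit] at h
  | cons a rest ih =>
    simp only [pvFindSplit] at h
    split at h
    · rename_i hp
      simp at h
      obtain ⟨h1, h2, h3⟩ := h
      subst h1; subst h2; subst h3
      exact ⟨rfl, hp⟩
    · cases hfs : pvFindSplit cmd rest with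
      | none => simp [hfs] at h
      | some pm =>
        obtain ⟨p', c', r'⟩ := pm
        simp [hfs] at h
        obtain ⟨h1, h2, h3⟩ := h
        subst h1; subst h2; subst h3
        obtain ⟨e1, e2⟩ := ih p' hfs
        exact ⟨by simp [e1], e2⟩

theorem pvFindSplit_len (cmd : List Char) (s pre : List Char) (c : Char) (r : List Char)
    (h : pvFindSplit cmd s = some (pre, c, r)) : (c :: r).length ≤ s.length := by
  have := (pvFindSplit_spec cmd s pre c r h).1
  subst this; simp

-- B's outer loop: jump from match to match, emitting whole slices between matches;
-- head?/tail mirror B's `j < n and content[j] == '{'` test and `k = j + 1` start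
def pvLoopB (cmd : List Char) (s : List Char) : List Char :=
  match hf : pvFindSplit cmd s with
  | none => s
  | some (pre, c, r) =>
    if hbr : (((c :: r).drop cmd.length).dropWhile pvWs).head? = some '{' then
      pre ++ pvLoopB cmd (pvSkipBraces 1 (((c :: r).drop cmd.length).dropWhile pvWs).tail)
    else pre ++ c :: pvLoopB cmd r
termination_by s.length
decreasing_by
  all_goals have hle := pvFindSplit_len cmd s pre c r hf
  · have hne : ((c :: r).drop cmd.length).dropWhile pvWs ≠ [] := by
      intro he; rw [he] at hbr; simp at hbr
    have h1 : (((c :: r).drop cmd.length).dropWhile pvWs).length ≤ ((c :: r).drop cmd.length).length :=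
      List.length_dropWhile_le _ _
    have h2 := pvSkipBraces_len 1 ((((c :: r).drop cmd.length).dropWhile pvWs).tail)
    have h3 : (((c :: r).drop cmd.length).dropWhile pvWs).tail.length
        = (((c :: r).drop cmd.length).dropWhile pvWs).length - 1 := List.length_tail
    have h4 : 1 ≤ (((c :: r).drop cmd.length).dropWhile pvWs).length :=
      List.length_pos_iff.mpr hne
    simp [List.length_drop] at h1 hle ⊢
    omega
  · simp at hle ⊢; omega

def remove_nested_braces_alt (content : String) (command : String) : String :=
  String.ofList (pvLoopB ('\\' :: command.toList) content.toList)

-- ===== PRECONDITION & SPEC =====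
def Spec_remove_nested_braces (content : String) (command : String) (out : String) : Prop := out = remove_nested_braces_alt content command
instance (content : String) (command : String) (out : String) : Decidable (Spec_remove_nested_braces content command out) := by unfold Spec_remove_nested_braces; infer_instance

-- ===== CLAIM (what is proved, stated in full; the proofs are below) =====
def Claim_equal_remove_nested_braces : Prop := ∀ (content : String) (command : String), Dom_remove_nested_braces content command → Spec_remove_nested_braces content command (remove_nested_braces content command)

-- ===== LEMMAS AND PROOFS =====

theorem pvLoopA_no_match (cmd : List Char) (s : List Char)
    (h : pvFindSplit cmd s = none) : pvLoopA cmd s = s := by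
  induction s with
  | nil => simp [pvLoopA]
  | cons c rest ih =>
    simp only [pvFindSplit] at h
    split at h
    · simp at h
    · rename_i hp
      cases hfs : pvFindSplit cmd rest with
      | none => rw [pvLoopA, if_neg hp, ih hfs]
      | some pm => simp [hfs] at h

theorem pvLoopA_split (cmd : List Char) (s pre : List Char) (c : Char) (r : List Char)
    (h : pvFindSplit cmd s = some (pre, c, r)) :
    pvLoopA cmd s = pre ++ pvLoopA cmd (c :: r) := by
  induction s generalizing pre with
  | nil => simp [pvFindSplit] at h
  | cons a rest ih =>
    simp only [pvFindSplit] at h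
    split at h
    · simp at h
      obtain ⟨h1, h2, h3⟩ := h
      subst h1; subst h2; subst h3; simp
    · rename_i hp
      cases hfs : pvFindSplit cmd rest with
      | none => simp [hfs] at h
      | some pm =>
        obtain ⟨p', c', r'⟩ := pm
        simp [hfs] at h
        obtain ⟨h1, h2, h3⟩ := h
        subst h1; subst h2; subst h3
        conv_lhs => rw [pvLoopA]
        rw [if_neg hp, ih p' hfs]
        simp

theorem pvLoopAB (cmd : List Char) (s : List Char) : pvLoopA cmd s = pvLoopB cmd s := by
  induction hn : s.length using Nat.strong_induction_on generalizing s with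
  | _ n ih =>
  subst hn
  rw [pvLoopB.eq_def]
  split
  · rename_i hf
    exact pvLoopA_no_match cmd s hf
  · rename_i pre c r hf
    obtain ⟨hs, hpref⟩ := pvFindSplit_spec cmd s pre c r hf
    have hle : (c :: r).length ≤ s.length := by subst hs; simp
    rw [pvLoopA_split cmd s pre c r hf]
    conv_lhs => rw [pvLoopA, if_pos hpref]
    split
    · rename_i u ht
      have hh : (((c :: r).drop cmd.length).dropWhile pvWs).head? = some '{' := by
        rw [ht]; rfl
      rw [dif_pos hh, ht]
      have hu : (pvSkipBraces 1 u).length < s.length := by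
        have h1 : ('{' :: u).length ≤ ((c :: r).drop cmd.length).length := by
          rw [← ht]; exact List.length_dropWhile_le _ _
        have := pvSkipBraces_len 1 u
        simp [List.length_drop] at h1 hle ⊢
        omega
      rw [ih _ hu _ rfl]
      simp
    · rename_i hne
      have hh : ¬ ((((c :: r).drop cmd.length).dropWhile pvWs).head? = some '{') := by
        cases hdw : ((c :: r).drop cmd.length).dropWhile pvWs with
        | nil => simp
        | cons t u =>
          simp only [List.head?_cons, Option.some.injEq]
          intro htb
          exact hne u (by rw [hdw, htb])
      rw [dif_neg hh]
      have hr : r.length < s.length := by simp at hle ⊢; omega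
      rw [ih _ hr _ rfl]

-- ===== VERDICT (by name: the statement is the Claim_ definition above) =====
theorem remove_nested_braces_spec : Claim_equal_remove_nested_braces := by
  intro content command _
  unfold Spec_remove_nested_braces remove_nested_braces remove_nested_braces_alt
  rw [pvLoopAB]
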